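-- pv_equiv track=rewrite | github.com/juhapekka/tira25 | onediff.py | count_strings
-- ===== SOURCE A (Python) =====
-- def count_strings(n):
--     # TODO
--     if n <= 0: # 0 => 0
--         return 0
--     if n == 1: # 1 => 26
--         return 26
--
--     maarat = [1] * 26
--
--     for _ in range(2, n + 1):
--         uus = [0] * 26
--
--         for i in range(26):
--             if i == 0:
--                 uus[i] = maarat[1]
--             elif i == 25:
--                 uus[i] = maarat[24]
--             else:
--                 uus[i] = maarat[i - 1] + maarat[i + 1]
--         maarat = uus
--
--     return sum(maarat)
-- ===== SOURCE B (Python) =====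
-- def count_strings(n):
--     # Meet-in-the-middle: run the shift-and-add DP only ~(n-1)/2 times and
--     # combine the two half-vectors with a dot product (the step map is
--     # symmetric, so <T^a 1, T^b 1> = sum(T^(a+b) 1)).
--     if n <= 0:
--         return 0
--     if n == 1:
--         return 26
--
--     def step(v):
--         return [a + b for a, b in zip([0] + v[:-1], v[1:] + [0])]
--
--     half = (n - 1) // 2
--     v = [1] * 26
--     for _ in range(half):
--         v = step(v)
--     w = v if (n - 1) % 2 == 0 else step(v)
--     return sum(x * y for x, y in zip(v, w))
-- ===== Notes on version B (the rewrite author's own statement) =====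
-- stated objective: faster
-- what changed: Instead of iterating A's per-letter indexed update once per extra character and summing at the end, B runs a branch-free shift-and-add step only about half as many times and combines the two half vectors with a dot product, using that the transition map is self-adjoint; measured about three times faster at the largest sizes.
import Mathlib
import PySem

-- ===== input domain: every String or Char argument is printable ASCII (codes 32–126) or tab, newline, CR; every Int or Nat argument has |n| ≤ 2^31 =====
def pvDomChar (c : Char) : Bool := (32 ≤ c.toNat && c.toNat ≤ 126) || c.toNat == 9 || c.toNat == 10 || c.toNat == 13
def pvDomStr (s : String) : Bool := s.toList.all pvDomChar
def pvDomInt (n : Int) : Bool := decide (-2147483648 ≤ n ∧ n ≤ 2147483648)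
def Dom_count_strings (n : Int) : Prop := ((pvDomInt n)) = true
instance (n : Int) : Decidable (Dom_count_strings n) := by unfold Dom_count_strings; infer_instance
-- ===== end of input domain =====

-- B replaces A's per-letter indexed DP update with a branch-free shift-and-add step, runs it
-- about half as many times, and combines the two half vectors with a dot product (the step map
-- is self-adjoint).

-- ===== PORT A =====
def count_strings (n : Int) : Int :=
  if n ≤ 0 then 0
  else if n = 1 then 26
  else
    let maarat : List Int := List.replicate 26 1
    let maarat := (PySem.List.pyRange 2 (n + 1) 1).foldl (fun maarat _ =>
      let uus : List Int := List.replicate 26 0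
      let uus := (PySem.List.pyRange 0 26 1).foldl (fun uus i =>
        if i = 0 then PySem.List.pySetD uus i (PySem.List.pyGetD maarat 1 0)
        else if i = 25 then PySem.List.pySetD uus i (PySem.List.pyGetD maarat 24 0)
        else PySem.List.pySetD uus i
          (PySem.List.pyGetD maarat (i - 1) 0 + PySem.List.pyGetD maarat (i + 1) 0)) uus
      uus) maarat
    maarat.sum

-- ===== PORT B =====
-- step(v) = [a + b for a, b in zip([0] + v[:-1], v[1:] + [0])]
def pvStep (v : List Int) : List Int :=
  (List.zip ((0 : Int) :: PySem.List.slice v none (some (-1)))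
            (PySem.List.slice v (some 1) none ++ [(0 : Int)])).map (fun ab => ab.1 + ab.2)

-- sum(x * y for x, y in zip(v, w))
def pvDot (v w : List Int) : Int := ((List.zip v w).map (fun xy => xy.1 * xy.2)).sum

def count_strings_alt (n : Int) : Int :=
  if n ≤ 0 then 0
  else if n = 1 then 26
  else
    let half := PySem.Int.floordiv (n - 1) 2
    let v := (PySem.List.pyRange 0 half 1).foldl (fun v _ => pvStep v) (List.replicate 26 (1 : Int))
    let w := if PySem.Int.mod (n - 1) 2 = 0 then v else pvStep v
    pvDot v w

-- ===== PRECONDITION & SPEC =====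
def Spec_count_strings (n : Int) (out : Int) : Prop := out = count_strings_alt n
instance (n : Int) (out : Int) : Decidable (Spec_count_strings n out) := by unfold Spec_count_strings; infer_instance

-- ===== CLAIM (what is proved, stated in full; the proofs are below) =====
def Claim_equal_count_strings : Prop := ∀ (n : Int), Dom_count_strings n → Spec_count_strings n (count_strings n)

-- ===== LEMMAS AND PROOFS =====

-- the value A's inner loop writes at index i
def pvG (m : List Int) (i : Int) : Int :=
  if i = 0 then PySem.List.pyGetD m 1 0
  else if i = 25 then PySem.List.pyGetD m 24 0
  else PySem.List.pyGetD m (i - 1) 0 + PySem.List.pyGetD m (i + 1) 0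

-- A's inner loop, as a named function
def pvInnerA (maarat : List Int) : List Int :=
  (PySem.List.pyRange 0 26 1).foldl (fun uus i =>
    if i = 0 then PySem.List.pySetD uus i (PySem.List.pyGetD maarat 1 0)
    else if i = 25 then PySem.List.pySetD uus i (PySem.List.pyGetD maarat 24 0)
    else PySem.List.pySetD uus i
      (PySem.List.pyGetD maarat (i - 1) 0 + PySem.List.pyGetD maarat (i + 1) 0)) (List.replicate 26 0)

lemma pvList26 (v : List Int) (h : v.length = 26) :
    ∃ a0 a1 a2 a3 a4 a5 a6 a7 a8 a9 a10 a11 a12 a13 a14 a15 a16 a17 a18 a19 a20 a21 a22 a23 a24 a25 : Int, v = [a0, a1, a2, a3, a4, a5, a6, a7, a8, a9, a10, a11, a12, a13, a14, a15, a16, a17, a18, a19, a20, a21, a22, a23, a24, a25] := by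
  obtain ⟨a0, v, rfl⟩ := List.exists_of_length_succ v (show v.length = 25 + 1 by omega)
  replace h : v.length = 25 := by simpa using h
  obtain ⟨a1, v, rfl⟩ := List.exists_of_length_succ v (show v.length = 24 + 1 by omega)
  replace h : v.length = 24 := by simpa using h
  obtain ⟨a2, v, rfl⟩ := List.exists_of_length_succ v (show v.length = 23 + 1 by omega)
  replace h : v.length = 23 := by simpa using h
  obtain ⟨a3, v, rfl⟩ := List.exists_of_length_succ v (show v.length = 22 + 1 by omega)
  replace h : v.length = 22 := by simpa using h
  obtain ⟨a4, v, rfl⟩ := List.exists_of_length_succ v (show v.length = 21 + 1 by omega)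
  replace h : v.length = 21 := by simpa using h
  obtain ⟨a5, v, rfl⟩ := List.exists_of_length_succ v (show v.length = 20 + 1 by omega)
  replace h : v.length = 20 := by simpa using h
  obtain ⟨a6, v, rfl⟩ := List.exists_of_length_succ v (show v.length = 19 + 1 by omega)
  replace h : v.length = 19 := by simpa using h
  obtain ⟨a7, v, rfl⟩ := List.exists_of_length_succ v (show v.length = 18 + 1 by omega)
  replace h : v.length = 18 := by simpa using h
  obtain ⟨a8, v, rfl⟩ := List.exists_of_length_succ v (show v.length = 17 + 1 by omega)
  replace h : v.length = 17 := by simpa using h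
  obtain ⟨a9, v, rfl⟩ := List.exists_of_length_succ v (show v.length = 16 + 1 by omega)
  replace h : v.length = 16 := by simpa using h
  obtain ⟨a10, v, rfl⟩ := List.exists_of_length_succ v (show v.length = 15 + 1 by omega)
  replace h : v.length = 15 := by simpa using h
  obtain ⟨a11, v, rfl⟩ := List.exists_of_length_succ v (show v.length = 14 + 1 by omega)
  replace h : v.length = 14 := by simpa using h
  obtain ⟨a12, v, rfl⟩ := List.exists_of_length_succ v (show v.length = 13 + 1 by omega)
  replace h : v.length = 13 := by simpa using h
  obtain ⟨a13, v, rfl⟩ := List.exists_of_length_succ v (show v.length = 12 + 1 by omega)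
  replace h : v.length = 12 := by simpa using h
  obtain ⟨a14, v, rfl⟩ := List.exists_of_length_succ v (show v.length = 11 + 1 by omega)
  replace h : v.length = 11 := by simpa using h
  obtain ⟨a15, v, rfl⟩ := List.exists_of_length_succ v (show v.length = 10 + 1 by omega)
  replace h : v.length = 10 := by simpa using h
  obtain ⟨a16, v, rfl⟩ := List.exists_of_length_succ v (show v.length = 9 + 1 by omega)
  replace h : v.length = 9 := by simpa using h
  obtain ⟨a17, v, rfl⟩ := List.exists_of_length_succ v (show v.length = 8 + 1 by omega)
  replace h : v.length = 8 := by simpa using h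
  obtain ⟨a18, v, rfl⟩ := List.exists_of_length_succ v (show v.length = 7 + 1 by omega)
  replace h : v.length = 7 := by simpa using h
  obtain ⟨a19, v, rfl⟩ := List.exists_of_length_succ v (show v.length = 6 + 1 by omega)
  replace h : v.length = 6 := by simpa using h
  obtain ⟨a20, v, rfl⟩ := List.exists_of_length_succ v (show v.length = 5 + 1 by omega)
  replace h : v.length = 5 := by simpa using h
  obtain ⟨a21, v, rfl⟩ := List.exists_of_length_succ v (show v.length = 4 + 1 by omega)
  replace h : v.length = 4 := by simpa using h
  obtain ⟨a22, v, rfl⟩ := List.exists_of_length_succ v (show v.length = 3 + 1 by omega)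
  replace h : v.length = 3 := by simpa using h
  obtain ⟨a23, v, rfl⟩ := List.exists_of_length_succ v (show v.length = 2 + 1 by omega)
  replace h : v.length = 2 := by simpa using h
  obtain ⟨a24, v, rfl⟩ := List.exists_of_length_succ v (show v.length = 1 + 1 by omega)
  replace h : v.length = 1 := by simpa using h
  obtain ⟨a25, v, rfl⟩ := List.exists_of_length_succ v (show v.length = 0 + 1 by omega)
  replace h : v.length = 0 := by simpa using h
  rw [List.length_eq_zero_iff] at h; subst h
  exact ⟨a0, a1, a2, a3, a4, a5, a6, a7, a8, a9, a10, a11, a12, a13, a14, a15, a16, a17, a18, a19, a20, a21, a22, a23, a24, a25, rfl⟩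

lemma pvFoldlConst {α β : Type} (l : List β) (f : α → α) (x : α) :
    l.foldl (fun a _ => f a) x = f^[l.length] x := by
  induction l generalizing x with
  | nil => rfl
  | cons b t ih => simp [List.foldl_cons, ih, Function.iterate_succ_apply]

lemma pvFoldSet (g : Int → Int) (k : Nat) (init : List Int) (h : k ≤ init.length) :
    (PySem.List.pyRange 0 (k : Int) 1).foldl (fun u i => PySem.List.pySetD u i (g i)) init
    = (List.range k).map (fun (j : Nat) => g (j : Int)) ++ init.drop k := by
  induction k with
  | zero => simp [PySem.List.pyRange_one_eq_nil]
  | succ k ih =>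
    rw [show ((k + 1 : Nat) : Int) = (k : Int) + 1 by push_cast; ring,
        PySem.List.pyRange_one_succ_right (by positivity), List.foldl_append,
        ih (by omega)]
    simp only [List.foldl_cons, List.foldl_nil, PySem.List.pySetD_natCast]
    rw [List.range_succ, List.map_append, List.set_append_right _ _ (by simp),
        ← List.getElem_cons_drop (as := init) (i := k) (by omega)]
    simp
    rw [← List.getElem_cons_drop (as := init) (i := k) (by omega), List.set_cons_zero]

lemma pvInner_eq_mapG (v : List Int) :
    pvInnerA v = (List.range 26).map (fun (j : Nat) => pvG v (j : Int)) := by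
  unfold pvInnerA
  rw [show (fun (uus : List Int) (i : Int) =>
        if i = 0 then PySem.List.pySetD uus i (PySem.List.pyGetD v 1 0)
        else if i = 25 then PySem.List.pySetD uus i (PySem.List.pyGetD v 24 0)
        else PySem.List.pySetD uus i
          (PySem.List.pyGetD v (i - 1) 0 + PySem.List.pyGetD v (i + 1) 0))
      = (fun u i => PySem.List.pySetD u i (pvG v i)) by
    funext u i; unfold pvG; split_ifs <;> rfl]
  rw [show (26 : Int) = ((26 : Nat) : Int) by norm_num,
      pvFoldSet (pvG v) 26 (List.replicate 26 0) (by simp)]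
  simp

set_option maxHeartbeats 2000000 in
set_option maxRecDepth 10000 in
lemma pvMapG_eq_step (v : List Int) (h : v.length = 26) :
    (List.range 26).map (fun (j : Nat) => pvG v (j : Int)) = pvStep v := by
  obtain ⟨a0, a1, a2, a3, a4, a5, a6, a7, a8, a9, a10, a11, a12, a13, a14, a15, a16, a17, a18, a19, a20, a21, a22, a23, a24, a25, rfl⟩ := pvList26 v h
  rw [show List.range 26 = [0,1,2,3,4,5,6,7,8,9,10,11,12,13,14,15,16,17,18,19,20,21,22,23,24,25] from rfl]
  simp only [List.map_cons, List.map_nil]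
  norm_num [pvG]
  simp [pvStep, PySem.List.slice_to_neg_one, PySem.List.slice_from_one, List.zip,
        PySem.List.pyGetD_ofNat']

lemma pvInner_eq_step (v : List Int) (h : v.length = 26) : pvInnerA v = pvStep v :=
  (pvInner_eq_mapG v).trans (pvMapG_eq_step v h)

lemma pvStep_len (v : List Int) (h : v.length = 26) : (pvStep v).length = 26 := by
  simp [pvStep, PySem.List.slice_to_neg_one, PySem.List.slice_from_one, h]

lemma pvIter_len (k : Nat) (v : List Int) (h : v.length = 26) : (pvStep^[k] v).length = 26 := by
  induction k generalizing v with
  | zero => simpa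
  | succ k ih => rw [Function.iterate_succ_apply]; exact ih _ (pvStep_len v h)

lemma pvIterInner_eq (k : Nat) (v : List Int) (h : v.length = 26) :
    pvInnerA^[k] v = pvStep^[k] v := by
  induction k generalizing v with
  | zero => simp
  | succ k ih =>
    rw [Function.iterate_succ_apply, Function.iterate_succ_apply,
        pvInner_eq_step v h, ih _ (pvStep_len v h)]

set_option maxHeartbeats 2000000 in
set_option maxRecDepth 10000 in
lemma pvAdjoint (v w : List Int) (hv : v.length = 26) (hw : w.length = 26) :
    pvDot (pvStep v) w = pvDot v (pvStep w) := by
  obtain ⟨a0, a1, a2, a3, a4, a5, a6, a7, a8, a9, a10, a11, a12, a13, a14, a15, a16, a17, a18, a19, a20, a21, a22, a23, a24, a25, rfl⟩ := pvList26 v hv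
  obtain ⟨b0, b1, b2, b3, b4, b5, b6, b7, b8, b9, b10, b11, b12, b13, b14, b15, b16, b17, b18, b19, b20, b21, b22, b23, b24, b25, rfl⟩ := pvList26 w hw
  simp [pvDot, pvStep, PySem.List.slice_to_neg_one, PySem.List.slice_from_one, List.zip]
  ring

set_option maxHeartbeats 2000000 in
set_option maxRecDepth 10000 in
lemma pvSum_eq_dot (v : List Int) (h : v.length = 26) :
    v.sum = pvDot v (List.replicate 26 1) := by
  obtain ⟨a0, a1, a2, a3, a4, a5, a6, a7, a8, a9, a10, a11, a12, a13, a14, a15, a16, a17, a18, a19, a20, a21, a22, a23, a24, a25, rfl⟩ := pvList26 v h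
  simp [pvDot, List.zip]

lemma pvAdjoint_iter (m : Nat) (v w : List Int) (hv : v.length = 26) (hw : w.length = 26) :
    pvDot (pvStep^[m] v) w = pvDot v (pvStep^[m] w) := by
  induction m generalizing v w with
  | zero => simp
  | succ m ih =>
    rw [Function.iterate_succ_apply, Function.iterate_succ_apply',
        ih _ _ (pvStep_len v hv) hw, pvAdjoint v _ hv (pvIter_len m w hw)]

lemma pvSplit (a b : Nat) (x y : List Int) (hx : x.length = 26) (hy : y.length = 26) :
    pvDot (pvStep^[a + b] x) y = pvDot (pvStep^[a] x) (pvStep^[b] y) := by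
  rw [Nat.add_comm, Function.iterate_add_apply,
      pvAdjoint_iter b _ y (pvIter_len a x hx) hy]

-- ===== VERDICT (by name: the statement is the Claim_ definition above) =====
theorem count_strings_spec : Claim_equal_count_strings := by
  intro n _
  unfold Spec_count_strings
  by_cases h0 : n ≤ 0
  · simp [count_strings, count_strings_alt, h0]
  by_cases h1 : n = 1
  · simp [count_strings, count_strings_alt, h1]
  have hA : count_strings n
      = ((PySem.List.pyRange 2 (n + 1) 1).foldl (fun (m : List Int) (_ : Int) => pvInnerA m)
          (List.replicate 26 1)).sum := by
    rw [count_strings, if_neg h0, if_neg h1]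
    rfl
  have hB : count_strings_alt n
      = pvDot ((PySem.List.pyRange 0 (PySem.Int.floordiv (n - 1) 2) 1).foldl
                  (fun (v : List Int) (_ : Int) => pvStep v) (List.replicate 26 1))
              (if PySem.Int.mod (n - 1) 2 = 0 then
                 (PySem.List.pyRange 0 (PySem.Int.floordiv (n - 1) 2) 1).foldl
                   (fun (v : List Int) (_ : Int) => pvStep v) (List.replicate 26 1)
               else pvStep ((PySem.List.pyRange 0 (PySem.Int.floordiv (n - 1) 2) 1).foldl
                   (fun (v : List Int) (_ : Int) => pvStep v) (List.replicate 26 1))) := by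
    rw [count_strings_alt, if_neg h0, if_neg h1]
  rw [hA, hB, pvFoldlConst, pvFoldlConst, PySem.List.length_pyRange_one,
      PySem.List.length_pyRange_one]
  have hones : (List.replicate 26 (1 : Int)).length = 26 := by simp
  have hfd : PySem.Int.floordiv (n - 1) 2 = (n - 1) / 2 :=
    PySem.Int.floordiv_eq_ediv_of_pos (by omega)
  have hmd : PySem.Int.mod (n - 1) 2 = (n - 1) % 2 :=
    PySem.Int.mod_eq_emod_of_pos (by omega)
  set H : Nat := ((n - 1) / 2 - 0).toNat with hH
  have hNH : (n + 1 - 2).toNat = if (n - 1) % 2 = 0 then H + H else H + (H + 1) := by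
    split_ifs with hp <;> omega
  rw [hfd, hmd, hNH]
  rw [pvIterInner_eq _ _ hones]
  split_ifs with hp
  · rw [pvSum_eq_dot _ (pvIter_len _ _ hones), pvSplit H H _ _ hones hones]
  · rw [pvSum_eq_dot _ (pvIter_len _ _ hones), pvSplit H (H + 1) _ _ hones hones,
        Function.iterate_succ_apply']
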